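-- pv_equiv track=rewrite | github.com/42rakko/zen_hackathon0 | main.py | check_line_counts
-- ===== SOURCE A (Python) =====
-- size = 4
--
-- DIRECTIONS = [
--     (1,0,0),(0,1,0),(0,0,1),
--     (1,1,0),(1,-1,0),(1,0,1),(0,1,1),(0,-1,1),
--     (1,1,1),(1,-1,1),(1,1,-1),(1,-1,-1)
-- ]
--
-- def check_line_counts(board, player, opponent, move):
--     x, y, z = move
--     results = []
--
--     for dx, dy, dz in DIRECTIONS:
--         line = [(x + dx*i, y + dy*i, z + dz*i) for i in range(-3, 4)]
--         line = [(nx, ny, nz) for nx, ny, nz in line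
--                 if 0 <= nx < size and 0 <= ny < size and 0 <= nz < size]
--
--         if len(line) < 4:
--             continue
--
--         # ラインのタイプ判定
--         if dz != 0 and dx == 0 and dy == 0:
--             line_type = 2 #垂直
--         elif dz == 0 and (dx != 0 or dy != 0):
--             line_type = 1 #水平
--         else:
--             line_type = 3 #ななめ
--
--         for i in range(len(line)-3):
--             segment = line[i:i+4]
--             if (x, y, z) not in segment:
--                 continue
--
--             my_count = sum(1 for (nx, ny, nz) in segment if board[nz][ny][nx] == player)
--             opp_count = sum(1 for (nx, ny, nz) in segment if board[nz][ny][nx] == opponent)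
--
--             results.append((my_count, opp_count, line_type))
--
--     if not results:
--         return [(-1, -1, 0)]
--     return results
-- ===== SOURCE B (Python) =====
-- size = 4
--
-- DIRECTIONS = [
--     (1,0,0),(0,1,0),(0,0,1),
--     (1,1,0),(1,-1,0),(1,0,1),(0,1,1),(0,-1,1),
--     (1,1,1),(1,-1,1),(1,1,-1),(1,-1,-1)
-- ]
--
-- def check_line_counts(board, player, opponent, move):
--     # On a size-4 board a 4-window along any direction through an in-bounds cell is
--     # unique: each nonzero axis forces the start offset (s = -c for +1, c-3 for -1).
--     # So instead of building/filtering a 7-point line and sliding a window, compute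
--     # the forced start per axis and keep the direction iff they agree.
--     x, y, z = move
--     if not all(0 <= c < size for c in (x, y, z)):
--         return [(-1, -1, 0)]
--     results = []
--     for dx, dy, dz in DIRECTIONS:
--         ss = [(-c if d == 1 else c - size + 1) for d, c in ((dx, x), (dy, y), (dz, z)) if d]
--         if any(v != ss[0] for v in ss):
--             continue
--         s = ss[0]
--         t = 2 if (dx, dy) == (0, 0) else 1 if dz == 0 else 3
--         my = opp = 0
--         for j in range(s, s + 4):
--             v = board[z + dz*j][y + dy*j][x + dx*j]
--             my += v == player
--             opp += v == opponent
--         results.append((my, opp, t))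
--     return results if results else [(-1, -1, 0)]
-- ===== Notes on version B (the rewrite author's own statement) =====
-- stated objective: alternative
-- what changed: B exploits that on a size-4 board each direction admits at most one in-bounds 4-window through the move: after one upfront bounds check on the move, it computes the window's forced start offset per nonzero axis in closed form (-c for a +1 component, c-3 for a -1 component), keeps the direction iff the forced starts agree, and counts both players' marks in a single pass over the 4 cells; no 7-point line, no filtering, no sliding window, no membership test.
import Mathlib
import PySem

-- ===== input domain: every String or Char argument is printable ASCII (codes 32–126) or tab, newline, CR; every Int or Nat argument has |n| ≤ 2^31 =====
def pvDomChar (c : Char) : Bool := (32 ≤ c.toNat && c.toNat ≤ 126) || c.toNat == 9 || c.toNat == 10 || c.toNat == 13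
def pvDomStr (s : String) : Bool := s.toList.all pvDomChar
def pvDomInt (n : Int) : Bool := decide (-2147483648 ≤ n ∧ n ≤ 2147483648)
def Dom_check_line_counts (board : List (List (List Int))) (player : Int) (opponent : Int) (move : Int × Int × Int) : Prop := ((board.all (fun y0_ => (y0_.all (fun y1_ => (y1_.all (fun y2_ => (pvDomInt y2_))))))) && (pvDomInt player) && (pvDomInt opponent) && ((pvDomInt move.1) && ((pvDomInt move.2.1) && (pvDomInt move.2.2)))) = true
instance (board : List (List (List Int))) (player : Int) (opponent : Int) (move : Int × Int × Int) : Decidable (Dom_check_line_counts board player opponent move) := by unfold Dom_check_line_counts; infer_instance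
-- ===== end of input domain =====

-- B replaces A's build-7-point-line / filter / slide-a-window-with-membership-test
-- per direction by a closed-form forced start offset per nonzero axis (unique 4-window
-- on a size-4 board) and one combined counting pass (objective: alternative).

-- DIRECTIONS, module constant used by both Pythons
def pvDirs : List (Int × Int × Int) :=
  [(1,0,0),(0,1,0),(0,0,1),
   (1,1,0),(1,-1,0),(1,0,1),(0,1,1),(0,-1,1),
   (1,1,1),(1,-1,1),(1,1,-1),(1,-1,-1)]

-- board[nz][ny][nx]  (none exactly where Python raises IndexError; excluded by Pre_)
def pvCell (board : List (List (List Int))) (q : Int × Int × Int) : Option Int :=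
  ((PySem.List.pyGet? board q.2.2).bind (fun p => PySem.List.pyGet? p q.2.1)).bind
    (fun r => PySem.List.pyGet? r q.1)

-- ===== PORT A =====

-- 0 <= nx < size and 0 <= ny < size and 0 <= nz < size   (size = 4)
def pvInB (q : Int × Int × Int) : Bool :=
  decide (0 ≤ q.1 ∧ q.1 < 4 ∧ 0 ≤ q.2.1 ∧ q.2.1 < 4 ∧ 0 ≤ q.2.2 ∧ q.2.2 < 4)

-- sum(1 for (nx,ny,nz) in seg if board[nz][ny][nx] == v)
def pvCount (board : List (List (List Int))) (v : Int) (seg : List (Int × Int × Int)) : Int :=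
  seg.foldl (fun a q => a + (if pvCell board q = some v then 1 else 0)) 0

-- A's if/elif/else line-type classification
def pvLineType (dx dy dz : Int) : Int :=
  if dz ≠ 0 ∧ dx = 0 ∧ dy = 0 then 2
  else if dz = 0 ∧ (dx ≠ 0 ∨ dy ≠ 0) then 1
  else 3

def check_line_counts (board : List (List (List Int))) (player : Int) (opponent : Int) (move : Int × Int × Int) : List (Int × Int × Int) :=
  let x := move.1; let y := move.2.1; let z := move.2.2
  let results := pvDirs.foldl (fun results d =>
    let line := (PySem.List.pyRange (-3) 4 1).map
        (fun i => (x + d.1 * i, y + d.2.1 * i, z + d.2.2 * i))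
    let line := line.filter pvInB
    if line.length < 4 then results
    else
      let line_type := pvLineType d.1 d.2.1 d.2.2
      (PySem.List.pyRange 0 ((line.length : Int) - 3) 1).foldl (fun results i =>
        let segment := PySem.List.slice line (some i) (some (i + 4))
        if (x, y, z) ∈ segment then
          results ++ [(pvCount board player segment, pvCount board opponent segment, line_type)]
        else results) results) []
  if results = [] then [(-1, -1, 0)] else results

-- ===== PORT B =====

-- forced start offset of the unique 4-window for one nonzero axis:
-- -c if d == 1 else c - size + 1
def pvForced (d c : Int) : Int := if d = 1 then -c else c - 3

-- [(-c if d == 1 else c - size + 1) for d, c in ((dx,x),(dy,y),(dz,z)) if d]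
-- (nonempty for every direction in pvDirs, so ss[0] is ss.headD 0)
def pvStarts (x y z : Int) (d : Int × Int × Int) : List Int :=
  ([(d.1, x), (d.2.1, y), (d.2.2, z)].filter (fun p => p.1 ≠ 0)).map
    (fun p => pvForced p.1 p.2)

def check_line_counts_alt (board : List (List (List Int))) (player : Int) (opponent : Int) (move : Int × Int × Int) : List (Int × Int × Int) :=
  let x := move.1; let y := move.2.1; let z := move.2.2
  if ¬ (0 ≤ x ∧ x < 4 ∧ 0 ≤ y ∧ y < 4 ∧ 0 ≤ z ∧ z < 4) then [(-1, -1, 0)]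
  else
    let results := pvDirs.foldl (fun results d =>
      let ss := pvStarts x y z d
      if ss.any (fun v => v ≠ ss.headD 0) then results
      else
        let s := ss.headD 0
        let t : Int := if d.1 = 0 ∧ d.2.1 = 0 then 2 else if d.2.2 = 0 then 1 else 3
        let cnt := (PySem.List.pyRange s (s + 4) 1).foldl (fun (a : Int × Int) j =>
            let v := pvCell board (x + d.1 * j, y + d.2.1 * j, z + d.2.2 * j)
            (a.1 + (if v = some player then 1 else 0),
             a.2 + (if v = some opponent then 1 else 0))) (0, 0)
        results ++ [(cnt.1, cnt.2, t)]) []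
    if results = [] then [(-1, -1, 0)] else results

-- ===== PRECONDITION & SPEC =====
-- Pre_ excludes the inputs where A raises IndexError: an in-bounds move with a board
-- whose first four planes/rows are not at least 4×4×4.  It is slightly narrower than
-- A's exact return domain: A only indexes cells on lines through the move, so some
-- ragged boards on which A still returns are excluded (see the cite in claim.json).
def Pre_check_line_counts (board : List (List (List Int))) (player : Int) (opponent : Int) (move : Int × Int × Int) : Prop :=
  (0 ≤ move.1 ∧ move.1 < 4 ∧ 0 ≤ move.2.1 ∧ move.2.1 < 4 ∧ 0 ≤ move.2.2 ∧ move.2.2 < 4) →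
    (4 ≤ board.length ∧ ∀ p ∈ board.take 4, 4 ≤ p.length ∧ ∀ r ∈ p.take 4, 4 ≤ r.length)
instance (board : List (List (List Int))) (player : Int) (opponent : Int) (move : Int × Int × Int) : Decidable (Pre_check_line_counts board player opponent move) := by unfold Pre_check_line_counts; infer_instance

def pvWitness_check_line_counts : List (List (List Int)) × Int × Int × (Int × Int × Int) :=
  ([[[0,0,0,0],[0,0,0,0],[0,0,0,0],[0,0,0,0]],
    [[0,0,0,0],[0,0,0,0],[0,0,0,0],[0,0,0,0]],
    [[0,0,0,0],[0,0,0,0],[0,0,0,0],[0,0,0,0]],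
    [[0,0,0,0],[0,0,0,0],[0,0,0,0],[0,0,0,0]]], 1, 2, (0, 0, 0))

def Spec_check_line_counts (board : List (List (List Int))) (player : Int) (opponent : Int) (move : Int × Int × Int) (out : List (Int × Int × Int)) : Prop := out = check_line_counts_alt board player opponent move
instance (board : List (List (List Int))) (player : Int) (opponent : Int) (move : Int × Int × Int) (out : List (Int × Int × Int)) : Decidable (Spec_check_line_counts board player opponent move out) := by unfold Spec_check_line_counts; infer_instance

-- ===== CLAIM =====
def Claim_equal_check_line_counts : Prop := ∀ (board : List (List (List Int))) (player : Int) (opponent : Int) (move : Int × Int × Int), Dom_check_line_counts board player opponent move → Pre_check_line_counts board player opponent move → Spec_check_line_counts board player opponent move (check_line_counts board player opponent move)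

-- ===== LEMMAS AND PROOFS =====

theorem pvFoldl_id {α β : Type} (f : α → β → α) (l : List β) (init : α)
    (h : ∀ a b, b ∈ l → f a b = a) : l.foldl f init = init := by
  induction l generalizing init with
  | nil => rfl
  | cons b t ih =>
    simp only [List.foldl_cons]
    rw [h init b (by simp)]
    exact ih init (fun a c hc => h a c (List.mem_cons_of_mem _ hc))

-- with an out-of-bounds move, A appends nothing: every window of the
-- (in-bounds-filtered) line consists of in-bounds points, so none contains the move
theorem pvA_out (board : List (List (List Int))) (player opponent x y z : Int)
    (h : ¬ (0 ≤ x ∧ x < 4 ∧ 0 ≤ y ∧ y < 4 ∧ 0 ≤ z ∧ z < 4)) :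
    check_line_counts board player opponent (x, y, z) = [(-1, -1, 0)] := by
  unfold check_line_counts
  simp only []
  rw [pvFoldl_id]
  · rfl
  · intro acc d _
    dsimp only
    split_ifs with h1
    · rfl
    · rw [pvFoldl_id]
      intro acc2 i _
      dsimp only
      rw [if_neg]
      intro hmem
      have h2 := PySem.List.mem_of_mem_slice _ _ _ hmem
      have h3 := (List.mem_filter.1 h2).2
      simp only [pvInB, decide_eq_true_eq] at h3
      exact h h3

-- ===== VERDICT =====
set_option maxHeartbeats 4000000 in
theorem check_line_counts_spec : Claim_equal_check_line_counts := by
  intro board player opponent move _dom _pre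
  unfold Spec_check_line_counts
  obtain ⟨x, y, z⟩ := move
  by_cases h : 0 ≤ x ∧ x < 4 ∧ 0 ≤ y ∧ y < 4 ∧ 0 ≤ z ∧ z < 4
  · obtain ⟨h1, h2, h3, h4, h5, h6⟩ := h
    interval_cases x <;> interval_cases y <;> interval_cases z <;> rfl
  · rw [pvA_out board player opponent x y z h]
    unfold check_line_counts_alt
    simp only [if_pos h]
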